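-- pv_equiv track=rewrite | github.com/CasoMateo/Algorithms4Fun | Leetcode/890. Find and Replace Pattern/solution.py | rationalize
-- ===== SOURCE A (Python) =====
-- def rationalize(word):
--
--   mem = {}
--   cur = 0
--   word = list(word)
--
--   for j in range(len(word)):
--     if word[j] not in mem:
--       cur += 1
--       mem[word[j]] = chr(cur + 97)
--
--     word[j] = mem[word[j]]
--
--   return ''.join(word)
-- ===== SOURCE B (Python) =====
-- def rationalize(word):
--   # No mapping table at all: each character's code is 98 + the number of
--   # distinct characters strictly before its first occurrence in the word.
--   return ''.join(chr(98 + len(set(word[:word.index(c)]))) for c in word)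
-- ===== Notes on version B (the rewrite author's own statement) =====
-- stated objective: alternative
-- what changed: Drops A's mutable mapping dict and counter entirely: B computes each output character directly as chr(98 + number of distinct characters before that character's first occurrence), via word.index and a prefix set, trading A's O(n) single pass for a per-character closed form (O(n^2)).
import Mathlib
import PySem

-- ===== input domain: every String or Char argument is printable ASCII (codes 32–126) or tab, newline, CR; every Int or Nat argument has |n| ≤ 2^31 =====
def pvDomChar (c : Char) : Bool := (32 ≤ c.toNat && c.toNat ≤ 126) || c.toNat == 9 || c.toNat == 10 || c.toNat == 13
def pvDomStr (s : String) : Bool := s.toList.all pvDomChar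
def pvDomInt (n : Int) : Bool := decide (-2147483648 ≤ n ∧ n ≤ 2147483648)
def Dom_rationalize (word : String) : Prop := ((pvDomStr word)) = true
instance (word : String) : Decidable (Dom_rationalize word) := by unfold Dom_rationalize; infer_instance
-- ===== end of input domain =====

-- B drops A's mapping dict and counter: each output character is computed directly as
-- chr(98 + number of distinct characters before the first occurrence); return value only.

-- ===== PORT A =====
-- A's loop: one pass over the word; a new char bumps cur and enters mem as chr(cur+97),
-- then every position is rewritten through mem.  State = (mem, cur, rewritten prefix).
def rationalizeStep (st : PySem.Dict Char Char × Int × List Char) (c : Char) :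
    PySem.Dict Char Char × Int × List Char :=
  let (mem, cur, acc) := st
  if mem.contains c then
    (mem, cur, acc ++ [mem.getD c c])
  else
    let cur' := cur + 1
    let mem' := mem.insert c (Char.ofNat (cur' + 97).toNat)
    (mem', cur', acc ++ [mem'.getD c c])

def rationalize (word : String) : String :=
  let st := word.toList.foldl rationalizeStep (PySem.Dict.empty, 0, [])
  String.mk st.2.2

-- ===== PORT B =====
-- word.index(c) → idxOf (exact: c always occurs, so str.index never raises);
-- word[:i] with 0 ≤ i → take i (exact); set(…) → PySem.Set.ofList; len → .length.
def rationalize_alt (word : String) : String :=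
  let t := word.toList
  String.mk (t.map (fun c =>
    Char.ofNat (98 + (PySem.Set.ofList (t.take (t.idxOf c))).length)))

-- ===== PRECONDITION & SPEC =====
def Spec_rationalize (word : String) (out : String) : Prop := out = rationalize_alt word
instance (word : String) (out : String) : Decidable (Spec_rationalize word out) := by unfold Spec_rationalize; infer_instance

-- ===== CLAIM (what is proved, stated in full; the proofs are below) =====
def Claim_equal_rationalize : Prop := ∀ (word : String), Dom_rationalize word → Spec_rationalize word (rationalize word)

-- ===== LEMMAS AND PROOFS =====

-- canonical value both sides compute per character
def pvCanon (cs : List Char) (c : Char) : Char :=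
  Char.ofNat (98 + (PySem.List.dedup cs).idxOf c)

lemma dedup_append_singleton (cs : List Char) (c : Char) :
    PySem.List.dedup (cs ++ [c]) =
      if c ∈ PySem.List.dedup cs then PySem.List.dedup cs
      else PySem.List.dedup cs ++ [c] := by
  simp only [PySem.List.dedup_eq_ofList, PySem.Set.ofList_eq_foldl, List.foldl_append]
  simp [PySem.Set.add, PySem.Set.contains, ← PySem.Set.ofList_eq_foldl]

lemma canon_append_of_mem (cs : List Char) (c : Char) (h : c ∈ PySem.List.dedup cs) :
    pvCanon (cs ++ [c]) = pvCanon cs := by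
  funext c'
  unfold pvCanon
  rw [dedup_append_singleton, if_pos h]

lemma canon_append_of_not_mem (cs : List Char) (c : Char) (h : c ∉ PySem.List.dedup cs) :
    (∀ c' ∈ PySem.List.dedup cs, pvCanon (cs ++ [c]) c' = pvCanon cs c') ∧
    pvCanon (cs ++ [c]) c = Char.ofNat (98 + (PySem.List.dedup cs).length) := by
  have h' : c ∉ cs := fun hm => h ((PySem.List.mem_dedup cs c).2 hm)
  constructor
  · intro c' hc'
    unfold pvCanon
    rw [dedup_append_singleton, if_neg h, List.idxOf_append_of_mem hc']
  · unfold pvCanon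
    rw [dedup_append_singleton, if_neg h]
    rw [List.idxOf_append, if_neg (by simpa using h)]
    simp

lemma A_invariant (cs : List Char) :
    let st := cs.foldl rationalizeStep (PySem.Dict.empty, 0, [])
    (∀ c, st.1.contains c = decide (c ∈ PySem.List.dedup cs)) ∧
    st.2.1 = ((PySem.List.dedup cs).length : Int) ∧
    (∀ c ∈ cs, st.1.get? c = some (pvCanon cs c)) ∧
    st.2.2 = cs.map (pvCanon cs) := by
  induction cs using List.reverseRecOn with
  | nil => simp [PySem.List.dedup]
  | append_singleton cs c ih =>
    rcases h : cs.foldl rationalizeStep (PySem.Dict.empty, 0, []) with ⟨mem, cur, acc⟩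
    simp only [h] at ih
    obtain ⟨hcont, hcur, hget, hacc⟩ := ih
    simp only [List.foldl_append, List.foldl_cons, List.foldl_nil, h]
    by_cases hc : c ∈ PySem.List.dedup cs
    · have hcin : c ∈ cs := (PySem.List.mem_dedup cs c).1 hc
      have hcc : mem.contains c = true := by rw [hcont]; exact decide_eq_true hc
      have hstep : rationalizeStep (mem, cur, acc) c = (mem, cur, acc ++ [mem.getD c c]) := by
        simp [rationalizeStep, hcc]
      have hded : PySem.List.dedup (cs ++ [c]) = PySem.List.dedup cs := by
        rw [dedup_append_singleton, if_pos hc]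
      have hcanon := canon_append_of_mem cs c hc
      rw [hstep]
      refine ⟨?_, ?_, ?_, ?_⟩
      · intro c'; rw [hded]; exact hcont c'
      · rw [hded]; exact hcur
      · intro c' hc'
        rw [hcanon]
        rcases (List.mem_append.1 hc') with h' | h'
        · exact hget c' h'
        · simp only [List.mem_singleton] at h'; subst h'; exact hget c' hcin
      · rw [hcanon, List.map_append, hacc, PySem.Dict.getD_eq_get?_getD, hget c hcin]
        rfl
    · have hcin : c ∉ cs := fun h' => hc ((PySem.List.mem_dedup cs c).2 h')
      have hcc : mem.contains c = false := by rw [hcont]; exact decide_eq_false hc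
      have hstep : rationalizeStep (mem, cur, acc) c =
          (mem.insert c (Char.ofNat (cur + 1 + 97).toNat), cur + 1,
           acc ++ [(mem.insert c (Char.ofNat (cur + 1 + 97).toNat)).getD c c]) := by
        simp [rationalizeStep, hcc]
      have hded : PySem.List.dedup (cs ++ [c]) = PySem.List.dedup cs ++ [c] := by
        rw [dedup_append_singleton, if_neg hc]
      obtain ⟨hold, hnew⟩ := canon_append_of_not_mem cs c hc
      have hval : Char.ofNat (cur + 1 + 97).toNat = pvCanon (cs ++ [c]) c := by
        rw [hnew, hcur]; congr 1; omega
      have hmapcs : cs.map (pvCanon (cs ++ [c])) = cs.map (pvCanon cs) := by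
        apply List.map_congr_left
        intro c' hc'
        exact hold c' ((PySem.List.mem_dedup cs c').2 hc')
      rw [hstep]
      refine ⟨?_, ?_, ?_, ?_⟩
      · intro c'
        rw [hded, PySem.Dict.contains_insert, hcont]
        by_cases hce : c' = c <;> simp [hce]
      · rw [hded, hcur]
        simp only [List.length_append, List.length_cons, List.length_nil]
        push_cast; ring
      · intro c' hc'
        by_cases hce : c' = c
        · subst hce
          rw [PySem.Dict.get?_insert_self, hval]
        · rcases (List.mem_append.1 hc') with h' | h'
          · rw [PySem.Dict.get?_insert_of_ne _ _ hce, hget c' h',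
              hold c' ((PySem.List.mem_dedup cs c').2 h')]
          · simp only [List.mem_singleton] at h'; exact absurd h' hce
      · rw [List.map_append, hmapcs, hacc, PySem.Dict.getD_eq_get?_getD,
          PySem.Dict.get?_insert_self, hval]
        rfl

-- B's per-character rank: the number of distinct characters before c's first
-- occurrence is exactly c's position in the first-occurrence order.
lemma rank_eq (cs : List Char) :
    ∀ c ∈ cs, (PySem.List.dedup (cs.take (cs.idxOf c))).length
                = (PySem.List.dedup cs).idxOf c := by
  induction cs using List.reverseRecOn with
  | nil => intro c hc; simp at hc
  | append_singleton cs x ih =>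
    intro c hc
    by_cases hcin : c ∈ cs
    · have hidx : (cs ++ [x]).idxOf c = cs.idxOf c := List.idxOf_append_of_mem hcin
      have hlt : cs.idxOf c ≤ cs.length := le_of_lt (List.idxOf_lt_length_of_mem hcin)
      have htake : (cs ++ [x]).take ((cs ++ [x]).idxOf c) = cs.take (cs.idxOf c) := by
        rw [hidx, List.take_append_of_le_length hlt]
      rw [htake, ih c hcin]
      by_cases hx : x ∈ PySem.List.dedup cs
      · rw [dedup_append_singleton, if_pos hx]
      · rw [dedup_append_singleton, if_neg hx,
          List.idxOf_append_of_mem ((PySem.List.mem_dedup cs c).2 hcin)]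
    · have hcx : c = x := by
        rcases List.mem_append.1 hc with h' | h'
        · exact absurd h' hcin
        · simpa using h'
      subst hcx
      have hxd : c ∉ PySem.List.dedup cs := fun h => hcin ((PySem.List.mem_dedup cs c).1 h)
      have hidx : (cs ++ [c]).idxOf c = cs.length := by
        rw [List.idxOf_append, if_neg (by simpa using hcin)]
        simp
      rw [hidx, List.take_left, dedup_append_singleton, if_neg hxd,
        List.idxOf_append, if_neg (by simpa using hxd)]
      simp

-- ===== VERDICT (by name: the statement is the Claim_ definition above) =====
theorem rationalize_spec : Claim_equal_rationalize := by
  intro word _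
  unfold Spec_rationalize rationalize rationalize_alt
  obtain ⟨hcont, hcur, hget, hacc⟩ := A_invariant word.toList
  simp only [hacc]
  congr 1
  apply List.map_congr_left
  intro c hc
  unfold pvCanon
  rw [← PySem.List.dedup_eq_ofList, rank_eq word.toList c hc]
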